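-- pv_equiv track=rewrite | github.com/yuyichao/srtctrl | lib/srt_comm/jsonstm.py | _j_none_blk
-- ===== SOURCE A (Python) =====
-- _J_RES_BLK = -2
--
-- def _j_none_blk(jstr, start=0, char=None):
--     i = start
--     l = len(jstr)
--     while i < l:
--         if not jstr[i] in _j_blk_chars:
--             if not char is None and not jstr[i] in char:
--                 return
--             return i
--         i += 1
--     return _J_RES_BLK
--
-- _j_blk_chars = ' \t\n\r'
-- ===== SOURCE B (Python) =====
-- _J_RES_BLK = -2
--
-- _j_blk_chars = ' \t\n\r'
--
--
-- def _j_none_blk(jstr, start=0, char=None):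
--     rest = jstr[start:].lstrip(_j_blk_chars)
--     if not rest:
--         return _J_RES_BLK
--     if char is not None and rest[0] not in char:
--         return None
--     return len(jstr) - len(rest)
-- ===== Notes on version B (the rewrite author's own statement) =====
-- stated objective: simpler
-- what changed: Replaces the explicit index-walking while loop with a slice + lstrip and recovers the position by length arithmetic (len(jstr) - len(rest)).
-- outside the precondition, e.g. on _j_none_blk(' a', -2, None): A returns -1, B returns 1; on _j_none_blk('a', -3, None): A raises IndexError, B returns 0
import Mathlib
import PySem

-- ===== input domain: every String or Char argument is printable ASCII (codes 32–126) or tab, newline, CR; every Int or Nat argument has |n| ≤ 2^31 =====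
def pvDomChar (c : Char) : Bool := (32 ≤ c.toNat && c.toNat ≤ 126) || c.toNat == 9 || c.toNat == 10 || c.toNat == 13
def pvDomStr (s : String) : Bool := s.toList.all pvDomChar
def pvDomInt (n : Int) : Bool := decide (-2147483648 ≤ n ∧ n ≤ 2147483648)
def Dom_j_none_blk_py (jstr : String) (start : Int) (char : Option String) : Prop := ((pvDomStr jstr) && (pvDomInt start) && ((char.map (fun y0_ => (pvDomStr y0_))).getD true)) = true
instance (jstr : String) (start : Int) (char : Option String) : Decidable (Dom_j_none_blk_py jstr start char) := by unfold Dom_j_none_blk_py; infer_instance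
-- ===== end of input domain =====

-- B replaces A's index-walking while loop by slice + lstrip with length arithmetic; return-value
-- equivalence is proved for start ≥ 0 (Pre_), negative start (A wraps indices or raises) is excluded.

-- the module constant _j_blk_chars = ' \t\n\r'
def pvBlkChars : List Char := [' ', '\t', '\n', '\r']

-- ===== PORT A =====
-- the while loop of A: i walks from start while i < l
def j_none_blk_go (cs : List Char) (char : Option String) (l i : Int) : Option Int :=
  if h : i < l then
    match PySem.List.pyGet? cs i with
    | none => none  -- IndexError in Python (outside Pre_)
    | some c =>
      if ¬ (pvBlkChars.contains c) then
        if char.isSome ∧ ¬ ((char.getD "").toList.contains c) then none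
        else some i
      else
        j_none_blk_go cs char l (i + 1)
  else
    some (-2)
termination_by (l - i).toNat
decreasing_by omega

def j_none_blk_py (jstr : String) (start : Int) (char : Option String) : Option Int :=
  j_none_blk_go jstr.toList char (jstr.toList.length : Int) start

-- ===== PORT B =====
def j_none_blk_py_alt (jstr : String) (start : Int) (char : Option String) : Option Int :=
  -- jstr[start:].lstrip(_j_blk_chars): lstrip with an explicit char set is exactly dropWhile membership
  let rest := (PySem.List.slice jstr.toList (some start) none).dropWhile (fun c => pvBlkChars.contains c)
  match rest with
  | [] => some (-2)
  | c :: _ =>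
    match char with
    | some s => if ¬ (s.toList.contains c) then none else some ((jstr.toList.length : Int) - rest.length)
    | none => some ((jstr.toList.length : Int) - rest.length)

-- ===== PRECONDITION & SPEC =====
-- Pre_ requires a nonnegative start: for -len ≤ start < 0 A indexes with Python's negative-index
-- wraparound, scanning a wrapped suffix and then the whole string again and possibly returning a
-- negative position — an unspecified corner this helper is never called on — while for
-- start < -len A raises IndexError.
def Pre_j_none_blk_py (jstr : String) (start : Int) (char : Option String) : Prop := 0 ≤ start
instance (jstr : String) (start : Int) (char : Option String) : Decidable (Pre_j_none_blk_py jstr start char) := by unfold Pre_j_none_blk_py; infer_instance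

def pvWitness_j_none_blk_py : String × Int × Option String := ("  ab", 1, some "ab")

def Spec_j_none_blk_py (jstr : String) (start : Int) (char : Option String) (out : Option Int) : Prop := out = j_none_blk_py_alt jstr start char
instance (jstr : String) (start : Int) (char : Option String) (out : Option Int) : Decidable (Spec_j_none_blk_py jstr start char out) := by unfold Spec_j_none_blk_py; infer_instance

-- ===== CLAIM (what is proved, stated in full; the proofs are below) =====
def Claim_equal_j_none_blk_py : Prop := ∀ (jstr : String) (start : Int) (char : Option String), Dom_j_none_blk_py jstr start char → Pre_j_none_blk_py jstr start char → Spec_j_none_blk_py jstr start char (j_none_blk_py jstr start char)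

-- ===== LEMMAS AND PROOFS =====

-- the value B computes from the suffix cs.drop n of cs
def pvAltFrom (cs : List Char) (char : Option String) (n : Nat) : Option Int :=
  let rest := (cs.drop n).dropWhile (fun c => pvBlkChars.contains c)
  match rest with
  | [] => some (-2)
  | c :: _ =>
    match char with
    | some s => if ¬ (s.toList.contains c) then none else some ((cs.length : Int) - rest.length)
    | none => some ((cs.length : Int) - rest.length)

theorem go_eq_altFrom (cs : List Char) (char : Option String) :
    ∀ k n : Nat, cs.length - n ≤ k →
      j_none_blk_go cs char (cs.length : Int) (n : Int) = pvAltFrom cs char n := by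
  intro k
  induction k with
  | zero =>
    intro n hn
    have hge : cs.length ≤ n := by omega
    rw [j_none_blk_go]
    have hlt : ¬ ((n : Int) < (cs.length : Int)) := by exact_mod_cast not_lt.mpr hge
    simp [pvAltFrom, List.drop_eq_nil_of_le hge, hlt]
  | succ k ih =>
    intro n hn
    by_cases hlt : n < cs.length
    · have hdrop : cs.drop n = cs[n] :: cs.drop (n + 1) := List.drop_eq_getElem_cons hlt
      rw [j_none_blk_go]
      have hcast : ((n : Int) < (cs.length : Int)) := by exact_mod_cast hlt
      have hget : PySem.List.pyGet? cs (n : Int) = some cs[n] := by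
        simp [PySem.List.pyGet?_natCast, List.getElem?_eq_getElem hlt]
      simp only [hcast, dif_pos, hget]
      by_cases hblk : pvBlkChars.contains cs[n]
      · -- blank: the loop advances, dropWhile drops the head
        have hc1 : ((n : Int) + 1) = ((n + 1 : Nat) : Int) := by push_cast; ring
        rw [if_neg (by simpa using hblk), hc1, ih (n + 1) (by omega)]
        simp only [pvAltFrom, hdrop, List.dropWhile_cons_of_pos hblk]
      · -- non-blank at position n: both sides answer here
        have hrest : (cs.drop n).dropWhile (fun c => pvBlkChars.contains c)
            = cs[n] :: cs.drop (n + 1) := by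
          rw [hdrop]; exact List.dropWhile_cons_of_neg hblk
        rw [if_pos hblk]
        simp only [pvAltFrom, hrest]
        cases char with
        | none => simp; omega
        | some s =>
          by_cases hc : cs[n] ∈ s.toList
          · simp [hc]; omega
          · simp [hc]
    · have hge : cs.length ≤ n := by omega
      rw [j_none_blk_go]
      have hlt2 : ¬ ((n : Int) < (cs.length : Int)) := by exact_mod_cast not_lt.mpr hge
      simp [pvAltFrom, List.drop_eq_nil_of_le hge, hlt2]

theorem alt_eq_altFrom (jstr : String) (start : Int) (char : Option String) (h : 0 ≤ start) :
    j_none_blk_py_alt jstr start char = pvAltFrom jstr.toList char start.toNat := by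
  unfold j_none_blk_py_alt pvAltFrom
  rw [PySem.List.slice_from _ h]

-- ===== VERDICT (by name: the statement is the Claim_ definition above) =====
theorem j_none_blk_py_spec : Claim_equal_j_none_blk_py := by
  intro jstr start char _ hpre
  unfold Spec_j_none_blk_py j_none_blk_py
  rw [alt_eq_altFrom jstr start char hpre]
  have hs : (start.toNat : Int) = start := Int.toNat_of_nonneg hpre
  rw [← hs]
  exact go_eq_altFrom jstr.toList char (jstr.toList.length - start.toNat) start.toNat le_rfl
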